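-- pv_equiv track=rewrite | github.com/suciuradu09/UBB-Computer-Science | Semestrul1/FP/laborator3/Suciu_Radu_lab3.py | cerinta1
-- ===== SOURCE A (Python) =====
-- def cerinta1(nr1, nr2):
--     """
--     Functia verifica daca doua numere consecutive au
--     cel putin 2 cifre distincte comune
--     """
--     if nr1 <= 9 or nr2 <= 9:
--         return False
--     if nr1 < 0:
--         nr1 = abs(nr1)
--     if nr2 < 0:
--         nr2 = abs(nr2)
--     c = 0
--     fv = [0, 0, 0, 0, 0, 0, 0, 0, 0, 0, 0]
--     while nr1 != 0:
--         aux = nr1 % 10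
--         fv[aux] = 1
--         nr1 = nr1 // 10
--
--     while nr2 != 0:
--         aux = nr2 % 10
--         if fv[aux] == 1:
--             c = c + 1
--             fv[aux] = 0
--         nr2 = nr2 // 10
--     return c >= 2
-- ===== SOURCE B (Python) =====
-- def cerinta1(nr1, nr2):
--     if nr1 <= 9 or nr2 <= 9:
--         return False
--     s1, s2 = str(nr1), str(nr2)
--     found = 0
--     for d in "0123456789":
--         if d in s1 and d in s2:
--             found += 1
--             if found == 2:
--                 return True
--     return False
-- ===== Notes on version B (the rewrite author's own statement) =====
-- stated objective: alternative
-- what changed: Instead of extracting the digits of the inputs (two while loops over a frequency array with a running counter), B loops once over the fixed alphabet '0123456789', tests each digit for membership in both decimal string representations, and returns True early as soon as a second common digit is found.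
import Mathlib
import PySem

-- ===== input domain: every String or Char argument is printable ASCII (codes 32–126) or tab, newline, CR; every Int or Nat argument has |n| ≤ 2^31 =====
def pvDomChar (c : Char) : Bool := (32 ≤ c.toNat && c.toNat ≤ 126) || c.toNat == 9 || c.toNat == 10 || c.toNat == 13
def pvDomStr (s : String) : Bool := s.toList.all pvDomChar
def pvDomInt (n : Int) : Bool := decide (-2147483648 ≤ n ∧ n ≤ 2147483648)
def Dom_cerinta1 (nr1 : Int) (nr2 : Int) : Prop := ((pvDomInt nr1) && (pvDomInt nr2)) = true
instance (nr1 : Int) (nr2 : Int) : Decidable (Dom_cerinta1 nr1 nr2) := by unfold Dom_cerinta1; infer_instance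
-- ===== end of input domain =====

-- B drops A's digit-extraction loops and frequency array: it loops once over the fixed
-- alphabet "0123456789", testing each digit for membership in both decimal strings,
-- returning True early at the second hit (objective: alternative).

-- ===== PORT A =====
-- first while loop: mark each decimal digit of n in the frequency list fv
def fvLoop (n : Nat) (fv : List Int) : List Int :=
  if h : n = 0 then fv else fvLoop (n / 10) (fv.set (n % 10) 1)
  termination_by n
  decreasing_by exact Nat.div_lt_self (Nat.pos_of_ne_zero h) (by norm_num)

-- second while loop: count digits of n whose fv mark is 1, clearing the mark
def cLoop (n : Nat) (fv : List Int) (c : Int) : Int :=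
  if h : n = 0 then c
  else if fv.getD (n % 10) 0 = 1 then cLoop (n / 10) (fv.set (n % 10) 0) (c + 1)
  else cLoop (n / 10) fv c
  termination_by n
  decreasing_by all_goals exact Nat.div_lt_self (Nat.pos_of_ne_zero h) (by norm_num)

def cerinta1 (nr1 : Int) (nr2 : Int) : Bool :=
  if nr1 ≤ 9 ∨ nr2 ≤ 9 then false
  else
    -- Python's abs branches; past the guard the values are ≥ 10, so the while loops run on
    -- nonnegative ints, where Nat % and / coincide exactly with Python's % and //
    let n1 : Nat := if nr1 < 0 then nr1.natAbs else nr1.toNat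
    let n2 : Nat := if nr2 < 0 then nr2.natAbs else nr2.toNat
    let fv := fvLoop n1 [0, 0, 0, 0, 0, 0, 0, 0, 0, 0, 0]
    decide (cLoop n2 fv 0 ≥ 2)

-- ===== PORT B =====
-- the for loop of Source B over "0123456789" with the running counter `found` and the
-- early `return True`; Python's `d in s1` on a one-character d is exactly char membership
def bLoop (s1 s2 : List Char) : List Char → Int → Bool
  | [], _ => false
  | d :: rest, found =>
    if s1.contains d && s2.contains d then
      if found + 1 = 2 then true else bLoop s1 s2 rest (found + 1)
    else bLoop s1 s2 rest found

def cerinta1_alt (nr1 : Int) (nr2 : Int) : Bool :=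
  if nr1 ≤ 9 ∨ nr2 ≤ 9 then false
  else
    bLoop (PySem.Int.toStr nr1).toList (PySem.Int.toStr nr2).toList
      "0123456789".toList 0

-- ===== PRECONDITION & SPEC =====
def Spec_cerinta1 (nr1 : Int) (nr2 : Int) (out : Bool) : Prop := out = cerinta1_alt nr1 nr2
instance (nr1 : Int) (nr2 : Int) (out : Bool) : Decidable (Spec_cerinta1 nr1 nr2 out) := by unfold Spec_cerinta1; infer_instance

-- ===== CLAIM (what is proved, stated in full; the proofs are below) =====
def Claim_equal_cerinta1 : Prop := ∀ (nr1 : Int) (nr2 : Int), Dom_cerinta1 nr1 nr2 → Spec_cerinta1 nr1 nr2 (cerinta1 nr1 nr2)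

-- ===== LEMMAS AND PROOFS =====

-- the multiset of decimal digits of n (little-endian), for reasoning about both ports
def myDigs (n : Nat) : List Nat :=
  if h : n = 0 then [] else n % 10 :: myDigs (n / 10)
  termination_by n
  decreasing_by exact Nat.div_lt_self (Nat.pos_of_ne_zero h) (by norm_num)

lemma myDigs_zero : myDigs 0 = [] := by simp [myDigs]

lemma myDigs_pos {n : Nat} (h : n ≠ 0) : myDigs n = n % 10 :: myDigs (n / 10) := by
  rw [myDigs]; simp [h]

lemma mem_myDigs_lt {n d : Nat} (h : d ∈ myDigs n) : d < 10 := by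
  induction n using Nat.strong_induction_on with
  | _ n ih =>
    by_cases h0 : n = 0
    · subst h0; simp [myDigs_zero] at h
    · rw [myDigs_pos h0] at h
      rcases List.mem_cons.mp h with h1 | h1
      · subst h1; exact Nat.mod_lt _ (by norm_num)
      · exact ih (n / 10) (Nat.div_lt_self (Nat.pos_of_ne_zero h0) (by norm_num)) h1

lemma toDigitsCore_eq (fuel : Nat) : ∀ (n : Nat) (ds : List Char), 0 < n → n ≤ fuel →
    Nat.toDigitsCore 10 fuel n ds = ((myDigs n).map Nat.digitChar).reverse ++ ds := by
  induction fuel with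
  | zero => intro n ds h1 h2; omega
  | succ fuel ih =>
    intro n ds h1 h2
    rw [Nat.toDigitsCore]
    by_cases h0 : n / 10 = 0
    · simp only [h0]
      rw [myDigs_pos (Nat.pos_iff_ne_zero.mp h1), h0, myDigs_zero]
      simp
    · simp only [h0]
      rw [ih (n / 10) _ (Nat.pos_of_ne_zero h0)
        (by have := Nat.div_lt_self h1 (show 1 < 10 by norm_num); omega)]
      rw [myDigs_pos (Nat.pos_iff_ne_zero.mp h1)]
      simp

lemma mem_toChars {n : Int} (h : 10 ≤ n) (c : Char) :
    c ∈ PySem.Int.toChars n ↔ ∃ d ∈ myDigs n.toNat, c = Nat.digitChar d := by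
  have hn : ¬ n < 0 := by omega
  have hpos : 0 < n.toNat := by omega
  rw [PySem.Int.toChars, if_neg hn, Nat.toDigits,
    toDigitsCore_eq (n.toNat + 1) n.toNat [] hpos (by omega)]
  simp only [List.append_nil, List.mem_reverse, List.mem_map]
  constructor
  · rintro ⟨d, hd, rfl⟩; exact ⟨d, hd, rfl⟩
  · rintro ⟨d, hd, rfl⟩; exact ⟨d, hd, rfl⟩

lemma fvLoop_length (n : Nat) : ∀ fv : List Int, (fvLoop n fv).length = fv.length := by
  induction n using Nat.strong_induction_on with
  | _ n ih =>
    intro fv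
    by_cases h0 : n = 0
    · subst h0; rw [fvLoop]; simp
    · rw [fvLoop, dif_neg h0,
        ih (n / 10) (Nat.div_lt_self (Nat.pos_of_ne_zero h0) (by norm_num))]
      simp

lemma fvLoop_getD (n : Nat) : ∀ (fv : List Int) (d : Nat), fv.length = 11 → d < 11 →
    (fvLoop n fv).getD d 0 = if d ∈ myDigs n then 1 else fv.getD d 0 := by
  induction n using Nat.strong_induction_on with
  | _ n ih =>
    intro fv d hlen hd
    by_cases h0 : n = 0
    · subst h0; rw [fvLoop]; simp [myDigs_zero]
    · rw [fvLoop, dif_neg h0]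
      rw [ih (n / 10) (Nat.div_lt_self (Nat.pos_of_ne_zero h0) (by norm_num))
        _ d (by simp [hlen]) hd, myDigs_pos h0]
      by_cases hda : d = n % 10
      · have hone : (fv.set (n % 10) 1).getD d 0 = 1 := by
          rw [List.getD_eq_getElem?_getD, List.getElem?_set]
          have hx : n % 10 < fv.length := by omega
          rw [hda, if_pos rfl, if_pos hx]
          rfl
        have hmem : d ∈ n % 10 :: myDigs (n / 10) := by simp [hda]
        rw [if_pos hmem]
        split_ifs with hm
        · rfl
        · exact hone
      · have hne : (fv.set (n % 10) 1).getD d 0 = fv.getD d 0 := by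
          rw [List.getD_eq_getElem?_getD, List.getElem?_set, List.getD_eq_getElem?_getD,
            if_neg (fun he => hda he.symm)]
        rw [hne]
        simp [List.mem_cons, hda]

-- the number of digits d < 10 that occur in n and are marked 1 in fv
def cnt (n : Nat) (fv : List Int) : Nat :=
  ((Finset.range 10).filter (fun d => d ∈ myDigs n ∧ fv.getD d 0 = 1)).card

lemma cLoop_eq (n : Nat) : ∀ (fv : List Int) (c : Int), fv.length = 11 →
    cLoop n fv c = c + (cnt n fv : Int) := by
  induction n using Nat.strong_induction_on with
  | _ n ih =>
    intro fv c hlen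
    by_cases h0 : n = 0
    · subst h0; rw [cLoop]; simp [cnt, myDigs_zero]
    · have hlt : n / 10 < n := Nat.div_lt_self (Nat.pos_of_ne_zero h0) (by norm_num)
      have haux : n % 10 < 10 := Nat.mod_lt _ (by norm_num)
      rw [cLoop, dif_neg h0]
      by_cases h1 : fv.getD (n % 10) 0 = 1
      · rw [if_pos h1, ih (n / 10) hlt _ _ (by simp [hlen])]
        have hset : ∀ d : Nat, (fv.set (n % 10) 0).getD d 0 =
            if n % 10 = d then 0 else fv.getD d 0 := by
          intro d
          have hx : n % 10 < fv.length := by omega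
          rw [List.getD_eq_getElem?_getD, List.getElem?_set, List.getD_eq_getElem?_getD,
            if_pos hx]
          split_ifs with he <;> rfl
        have hkey : (cnt n fv : Int) = 1 + (cnt (n / 10) (fv.set (n % 10) 0) : Int) := by
          have hA : (Finset.range 10).filter (fun d => d ∈ myDigs n ∧ fv.getD d 0 = 1) =
              insert (n % 10) ((Finset.range 10).filter
                (fun d => d ∈ myDigs (n / 10) ∧ (fv.set (n % 10) 0).getD d 0 = 1)) := by
            ext d
            simp only [Finset.mem_insert, Finset.mem_filter, Finset.mem_range,
              myDigs_pos h0, List.mem_cons, hset]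
            constructor
            · rintro ⟨hd10, hmem | hmem, hfd⟩
              · left; exact hmem
              · by_cases he : n % 10 = d
                · left; exact he.symm
                · right; exact ⟨hd10, hmem, by rw [if_neg he]; exact hfd⟩
            · rintro (rfl | ⟨hd10, hmem, hfd⟩)
              · exact ⟨haux, Or.inl rfl, h1⟩
              · by_cases he : n % 10 = d
                · rw [if_pos he] at hfd; norm_num at hfd
                · rw [if_neg he] at hfd; exact ⟨hd10, Or.inr hmem, hfd⟩
          have hnot : (n % 10) ∉ (Finset.range 10).filter
              (fun d => d ∈ myDigs (n / 10) ∧ (fv.set (n % 10) 0).getD d 0 = 1) := by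
            simp only [Finset.mem_filter, Finset.mem_range, not_and]
            intro _ _
            rw [hset (n % 10), if_pos rfl]
            norm_num
          rw [cnt, cnt, hA, Finset.card_insert_of_notMem hnot]
          push_cast; ring
        rw [hkey]; ring
      · rw [if_neg h1, ih (n / 10) hlt _ _ hlen]
        have : cnt n fv = cnt (n / 10) fv := by
          unfold cnt
          congr 1
          ext d
          simp only [Finset.mem_filter, Finset.mem_range, myDigs_pos h0, List.mem_cons]
          constructor
          · rintro ⟨hd10, hmem | hmem, hfd⟩
            · exact absurd (hmem ▸ hfd) h1
            · exact ⟨hd10, hmem, hfd⟩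
          · rintro ⟨hd10, hmem, hfd⟩
            exact ⟨hd10, Or.inr hmem, hfd⟩
        rw [this]

lemma digitChar_injOn : ∀ a < 10, ∀ b < 10, Nat.digitChar a = Nat.digitChar b → a = b := by
  decide

-- the common-digit count A computes
lemma cnt_after_fvLoop (n1 n2 : Nat) :
    cnt n2 (fvLoop n1 [0, 0, 0, 0, 0, 0, 0, 0, 0, 0, 0]) =
      ((Finset.range 10).filter (fun d => d ∈ myDigs n1 ∧ d ∈ myDigs n2)).card := by
  unfold cnt
  congr 1
  ext d
  simp only [Finset.mem_filter, Finset.mem_range]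
  constructor
  · rintro ⟨hd10, hm2, hfd⟩
    refine ⟨hd10, ?_, hm2⟩
    rw [fvLoop_getD n1 _ d (by rfl) (by omega)] at hfd
    by_contra hno
    rw [if_neg hno] at hfd
    have hz : ([0, 0, 0, 0, 0, 0, 0, 0, 0, 0, 0] : List Int).getD d 0 = 0 := by
      rw [List.getD_eq_getElem?_getD]
      cases h : ([0, 0, 0, 0, 0, 0, 0, 0, 0, 0, 0] : List Int)[d]? with
      | none => rfl
      | some x =>
        have hmem := List.mem_of_getElem? h
        norm_num at hmem
        simp [hmem]
    rw [hz] at hfd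
    exact absurd hfd (by norm_num)
  · rintro ⟨hd10, hm1, hm2⟩
    refine ⟨hd10, hm2, ?_⟩
    rw [fvLoop_getD n1 _ d (by rfl) (by omega), if_pos hm1]

-- bLoop returns whether `found` plus the number of alphabet chars in both strings reaches 2
lemma bLoop_eq (s1 s2 : List Char) : ∀ (ds : List Char) (found : Int), found ≤ 1 →
    bLoop s1 s2 ds found =
      decide (found + ((ds.filter (fun d => s1.contains d && s2.contains d)).length : Int) ≥ 2) := by
  intro ds
  induction ds with
  | nil => intro found hf; simp [bLoop]; omega
  | cons d rest ih =>
    intro found hf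
    rw [bLoop]
    by_cases hp : (s1.contains d && s2.contains d) = true
    · have hlen : (List.filter (fun d => s1.contains d && s2.contains d) (d :: rest)).length =
          (List.filter (fun d => s1.contains d && s2.contains d) rest).length + 1 := by
        rw [List.filter_cons, if_pos hp]
        rfl
      rw [if_pos hp, hlen]
      by_cases h2 : found + 1 = 2
      · rw [if_pos h2]
        symm
        rw [decide_eq_true_iff]
        push_cast
        omega
      · rw [if_neg h2, ih (found + 1) (by omega)]
        exact decide_eq_decide.mpr (by push_cast; omega)
    · have hlen : (List.filter (fun d => s1.contains d && s2.contains d) (d :: rest)).length =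
          (List.filter (fun d => s1.contains d && s2.contains d) rest).length := by
        rw [List.filter_cons, if_neg hp]
      rw [if_neg hp, ih found hf, hlen]

lemma alphabet_eq : "0123456789".toList = (List.range 10).map Nat.digitChar := by decide

-- the alphabet scan of B counts exactly the common digits
lemma filter_alphabet_eq {nr1 nr2 : Int} (h1 : 10 ≤ nr1) (h2 : 10 ≤ nr2) :
    (("0123456789".toList).filter
        (fun d => (PySem.Int.toChars nr1).contains d && (PySem.Int.toChars nr2).contains d)).length =
      ((Finset.range 10).filter
        (fun d => d ∈ myDigs nr1.toNat ∧ d ∈ myDigs nr2.toNat)).card := by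
  rw [alphabet_eq, List.filter_map, List.length_map]
  have hpt : ∀ d ∈ List.range 10,
      ((fun d => (PySem.Int.toChars nr1).contains d && (PySem.Int.toChars nr2).contains d) ∘
        Nat.digitChar) d =
      decide (d ∈ myDigs nr1.toNat ∧ d ∈ myDigs nr2.toNat) := by
    intro d hd
    have hd10 : d < 10 := List.mem_range.mp hd
    have hside : ∀ n : Int, 10 ≤ n →
        (PySem.Int.toChars n).contains (Nat.digitChar d) = decide (d ∈ myDigs n.toNat) := by
      intro n hn
      rcases Bool.eq_false_or_eq_true ((PySem.Int.toChars n).contains (Nat.digitChar d)) with hc | hc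
      · rw [hc]
        symm
        rw [decide_eq_true_iff]
        have := (mem_toChars hn (Nat.digitChar d)).mp (List.contains_iff_mem.mp hc)
        obtain ⟨e, he, heq⟩ := this
        have := digitChar_injOn d hd10 e (mem_myDigs_lt he) heq
        exact this ▸ he
      · rw [hc]
        symm
        rw [decide_eq_false_iff_not]
        intro hmem
        have : Nat.digitChar d ∈ PySem.Int.toChars n := (mem_toChars hn _).mpr ⟨d, hmem, rfl⟩
        rw [← List.contains_iff_mem, hc] at this
        exact absurd this.symm (by simp)
    simp only [Function.comp_apply, hside nr1 h1, hside nr2 h2]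
    rcases Classical.em (d ∈ myDigs nr1.toNat) with hm1 | hm1 <;>
      rcases Classical.em (d ∈ myDigs nr2.toNat) with hm2 | hm2 <;>
      simp [hm1, hm2]
  rw [List.filter_congr hpt]
  rfl

-- ===== VERDICT (by name: the statement is the Claim_ definition above) =====
theorem cerinta1_spec : Claim_equal_cerinta1 := by
  intro nr1 nr2 _
  unfold Spec_cerinta1 cerinta1 cerinta1_alt
  by_cases hg : nr1 ≤ 9 ∨ nr2 ≤ 9
  · rw [if_pos hg, if_pos hg]
  · rw [if_neg hg, if_neg hg]
    have h1 : 10 ≤ nr1 := by omega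
    have h2 : 10 ≤ nr2 := by omega
    have hn1 : ¬ nr1 < 0 := by omega
    have hn2 : ¬ nr2 < 0 := by omega
    simp only [if_neg hn1, if_neg hn2]
    rw [cLoop_eq _ _ _ (by rw [fvLoop_length]; rfl), cnt_after_fvLoop]
    rw [PySem.Int.toList_toStr, PySem.Int.toList_toStr]
    rw [bLoop_eq _ _ _ 0 (by norm_num), filter_alphabet_eq h1 h2]
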